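-- pv_equiv track=rewrite | github.com/KaushikMuthumani/Auto-apply | forms/resolver.py | best_option
-- ===== SOURCE A (Python) =====
-- PREFER = [
--     "yes", "india", "bangalore", "chennai", "hyderabad",
--     "immediate", "fresher", "0", "0-1", "b.tech", "bachelor",
--     "full time", "permanent", "male", "2026",
-- ]
--
-- def best_option(options: list[str]) -> str | None:
--     """Pick the most appropriate dropdown option."""
--     opts_lower = [o.lower().strip() for o in options]
--     for pref in PREFER:
--         for i, opt in enumerate(opts_lower):
--             if pref in opt:
--                 return options[i]
--     non_blank = [o for o in options if o.strip()
--                  and "select" not in o.lower()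
--                  and "--" not in o]
--     return non_blank[0] if non_blank else None
-- ===== SOURCE B (Python) =====
-- PREFER = [
--     "yes", "india", "bangalore", "chennai", "hyderabad",
--     "immediate", "fresher", "0", "0-1", "b.tech", "bachelor",
--     "full time", "permanent", "male", "2026",
-- ]
--
--
-- def _rank(opt, prefs):
--     """Rank of the first preference that occurs in opt, else None."""
--     for r, p in enumerate(prefs):
--         if p in opt:
--             return r
--     return None
--
--
-- def best_option(options):
--     """Pick the most appropriate dropdown option (option-major running minimum)."""
--     best = None  # (original option, rank); updated only on strictly smaller rank
--     for o in options:
--         r = _rank(o.lower().strip(), PREFER)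
--         if r is not None and (best is None or r < best[1]):
--             best = (o, r)
--     if best is not None:
--         return best[0]
--     for o in options:
--         if o.strip() and "select" not in o.lower() and "--" not in o:
--             return o
--     return None
-- ===== Notes on version B (the rewrite author's own statement) =====
-- stated objective: alternative
-- what changed: B traverses option-major in a single pass, computing each option's preference rank once and keeping a running strict minimum (earliest index wins ties), instead of A's preference-major nested scan with early return; the fallback is a first-match loop instead of building the filtered list.
import Mathlib
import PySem

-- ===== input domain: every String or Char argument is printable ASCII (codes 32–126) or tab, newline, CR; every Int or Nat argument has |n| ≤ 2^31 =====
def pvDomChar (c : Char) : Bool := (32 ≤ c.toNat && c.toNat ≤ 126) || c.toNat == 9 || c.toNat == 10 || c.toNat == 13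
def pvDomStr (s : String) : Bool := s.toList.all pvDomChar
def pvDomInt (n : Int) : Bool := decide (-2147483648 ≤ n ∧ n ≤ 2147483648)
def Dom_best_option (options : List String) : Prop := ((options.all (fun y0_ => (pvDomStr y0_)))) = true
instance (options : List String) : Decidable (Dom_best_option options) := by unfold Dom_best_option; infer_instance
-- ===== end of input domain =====

-- B scans option-major keeping a running minimum preference rank (earliest index wins ties),
-- instead of A's preference-major nested scan with early return; same results, similar cost (alternative).


-- ===== PORT A =====
def PREFER : List String :=
  ["yes", "india", "bangalore", "chennai", "hyderabad",
   "immediate", "fresher", "0", "0-1", "b.tech", "bachelor",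
   "full time", "permanent", "male", "2026"]

-- inner loop of A: first pair (lowered, original) whose lowered form contains pref
def aScan (pref : String) : List (String × String) → Option String
  | [] => none
  | (opt, o) :: rest => if PySem.Str.isIn pref opt then some o else aScan pref rest

-- outer loop of A over PREFER
def aOuter : List String → List (String × String) → Option String
  | [], _ => none
  | p :: ps, zs =>
    match aScan p zs with
    | some o => some o
    | none => aOuter ps zs

def aNonBlank (o : String) : Bool :=
  (PySem.Str.len (PySem.Str.strip o) != 0)
    && !PySem.Str.isIn "select" (PySem.Str.lower o)
    && !PySem.Str.isIn "--" o

def best_option (options : List String) : Option String :=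
  let optsLower := options.map (fun o => PySem.Str.strip (PySem.Str.lower o))
  -- enumerate + options[i] rendered as the zip of the two equal-length lists
  match aOuter PREFER (optsLower.zip options) with
  | some o => some o
  | none => (options.filter aNonBlank).head?

-- ===== PORT B =====
-- rank of the first preference occurring in opt, else none
def rank_alt (opt : String) : List String → Nat → Option Nat
  | [], _ => none
  | p :: ps, r => if PySem.Str.isIn p opt then some r else rank_alt opt ps (r + 1)

-- single pass over the options, keeping (original option, rank) with a strict running minimum
def bestLoop (ps : List String) : List String → Option (String × Nat) → Option (String × Nat)
  | [], best => best
  | o :: os, best =>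
    let best' :=
      match rank_alt (PySem.Str.strip (PySem.Str.lower o)) ps 0, best with
      | none, b => b
      | some r, none => some (o, r)
      | some r, some (bo, br) => if r < br then some (o, r) else some (bo, br)
    bestLoop ps os best'

def bNonBlank (o : String) : Bool :=
  (PySem.Str.len (PySem.Str.strip o) != 0)
    && !PySem.Str.isIn "select" (PySem.Str.lower o)
    && !PySem.Str.isIn "--" o

def firstNonBlank : List String → Option String
  | [] => none
  | o :: os => if bNonBlank o then some o else firstNonBlank os

def best_option_alt (options : List String) : Option String :=
  match bestLoop PREFER options none with
  | some (bo, _) => some bo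
  | none => firstNonBlank options

-- ===== PRECONDITION & SPEC =====
def Spec_best_option (options : List String) (out : Option String) : Prop := out = best_option_alt options
instance (options : List String) (out : Option String) : Decidable (Spec_best_option options out) := by unfold Spec_best_option; infer_instance

-- ===== CLAIM (what is proved, stated in full; the proofs are below) =====
def Claim_equal_best_option : Prop := ∀ (options : List String), Dom_best_option options → Spec_best_option options (best_option options)

-- ===== LEMMAS AND PROOFS =====

def pvLow (o : String) : String := PySem.Str.strip (PySem.Str.lower o)

def pvMerge : Option (String × Nat) → Option (String × Nat) → Option (String × Nat)
  | b, none => b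
  | none, some x => some x
  | some (bo, br), some (o, r) => if r < br then some (o, r) else some (bo, br)

def pvLift (ps : List String) (o : String) : Option (String × Nat) :=
  (rank_alt (pvLow o) ps 0).map (fun r => (o, r))

lemma pvMerge_none_left (y : Option (String × Nat)) : pvMerge none y = y := by
  cases y with
  | none => rfl
  | some x => rfl

lemma pvMerge_none_right (x : Option (String × Nat)) : pvMerge x none = x := rfl

lemma pvMerge_assoc (x y z : Option (String × Nat)) :
    pvMerge (pvMerge x y) z = pvMerge x (pvMerge y z) := by
  cases x with
  | none => rw [pvMerge_none_left, pvMerge_none_left]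
  | some bx =>
    cases y with
    | none => rw [pvMerge_none_right, pvMerge_none_left]
    | some by' =>
      cases z with
      | none => rw [pvMerge_none_right, pvMerge_none_right]
      | some bz =>
        obtain ⟨bo, br⟩ := bx; obtain ⟨yo, yr⟩ := by'; obtain ⟨zo, zr⟩ := bz
        by_cases h1 : yr < br <;> by_cases h2 : zr < yr <;> by_cases h3 : zr < br <;>
          simp [pvMerge, h1, h2, h3] <;> omega

lemma step_eq_merge (ps : List String) (b : Option (String × Nat)) (o : String) :
    (match rank_alt (PySem.Str.strip (PySem.Str.lower o)) ps 0, b with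
      | none, b' => b'
      | some r, none => some (o, r)
      | some r, some (bo, br) => if r < br then some (o, r) else some (bo, br)) =
    pvMerge b (pvLift ps o) := by
  unfold pvLift pvLow
  cases h : rank_alt (PySem.Str.strip (PySem.Str.lower o)) ps 0 with
  | none => cases b <;> rfl
  | some r => cases b with
    | none => rfl
    | some p => obtain ⟨bo, br⟩ := p; rfl

lemma bestLoop_cons (ps : List String) (o : String) (os : List String)
    (b : Option (String × Nat)) :
    bestLoop ps (o :: os) b = bestLoop ps os (pvMerge b (pvLift ps o)) := by
  simp only [bestLoop]
  rw [step_eq_merge]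

lemma bestLoop_merge (ps : List String) (os : List String) (b : Option (String × Nat)) :
    bestLoop ps os b = pvMerge b (bestLoop ps os none) := by
  induction os generalizing b with
  | nil => cases b <;> rfl
  | cons o os ih =>
    rw [bestLoop_cons, bestLoop_cons, ih, ih (pvMerge none (pvLift ps o))]
    rw [pvMerge_none_left, pvMerge_assoc]

lemma rank_shift (opt : String) (ps : List String) (k : Nat) :
    rank_alt opt ps k = (rank_alt opt ps 0).map (· + k) := by
  induction ps generalizing k with
  | nil => rfl
  | cons p ps ih =>
    simp only [rank_alt]
    split_ifs with h
    · simp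
    · rw [ih (k + 1), ih 1]
      cases rank_alt opt ps 0 <;> simp <;> omega

-- ranks shift by one when the head preference matches nothing
def pvShift (x : String × Nat) : String × Nat := (x.1, x.2 + 1)

lemma pvLift_cons_neg (p : String) (ps : List String) (o : String)
    (h : PySem.Str.isIn p (pvLow o) = false) :
    pvLift (p :: ps) o = (pvLift ps o).map pvShift := by
  unfold pvLift
  simp only [rank_alt, pvLow] at *
  rw [h]
  simp only [Bool.false_eq_true, if_false, rank_shift _ ps 1]
  cases rank_alt (PySem.Str.strip (PySem.Str.lower o)) ps 0 <;> rfl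

lemma pvMerge_map_shift (x y : Option (String × Nat)) :
    pvMerge (x.map pvShift) (y.map pvShift) = (pvMerge x y).map pvShift := by
  cases x with
  | none => simp [pvMerge_none_left]
  | some bx =>
    cases y with
    | none => rfl
    | some by' =>
      obtain ⟨bo, br⟩ := bx; obtain ⟨yo, yr⟩ := by'
      simp only [Option.map, pvMerge, pvShift]
      split_ifs <;> simp_all

lemma pvMerge_zero_left (o : String) (y : Option (String × Nat)) :
    pvMerge (some (o, 0)) y = some (o, 0) := by
  cases y with
  | none => rfl
  | some p => obtain ⟨yo, yr⟩ := p; simp [pvMerge]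

-- if no option contains p, the (p :: ps)-loop is the ps-loop with every rank shifted up
lemma bestLoop_shift (p : String) (ps : List String) (os : List String)
    (h : aScan p ((os.map pvLow).zip os) = none) :
    bestLoop (p :: ps) os none = (bestLoop ps os none).map pvShift := by
  induction os with
  | nil => rfl
  | cons o os ih =>
    simp only [List.map, List.zip, List.zipWith, aScan] at h
    by_cases hp : PySem.Str.isIn p (pvLow o) = true
    · rw [hp] at h; simp at h
    · rw [Bool.not_eq_true] at hp
      rw [hp] at h; simp only [Bool.false_eq_true, if_false] at h
      rw [bestLoop_cons, bestLoop_cons, bestLoop_merge (p :: ps), bestLoop_merge ps, ih h,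
        pvMerge_none_left, pvMerge_none_left, pvLift_cons_neg p ps o hp,
        pvMerge_map_shift]

-- if the first option containing p is o, the (p :: ps)-loop returns (o, 0)
lemma bestLoop_zero (p : String) (ps : List String) (os : List String) (o : String)
    (h : aScan p ((os.map pvLow).zip os) = some o) :
    bestLoop (p :: ps) os none = some (o, 0) := by
  induction os with
  | nil => simp [aScan] at h
  | cons o' os ih =>
    simp only [List.map, List.zip, List.zipWith, aScan] at h
    rw [bestLoop_cons, bestLoop_merge (p :: ps), pvMerge_none_left]
    by_cases hp : PySem.Str.isIn p (pvLow o') = true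
    · rw [if_pos hp] at h
      have hlift : pvLift (p :: ps) o' = some (o', 0) := by
        unfold pvLift pvLow
        simp only [rank_alt, pvLow] at hp ⊢
        rw [hp]
        rfl
      rw [hlift, pvMerge_zero_left]
      rw [Option.some.injEq] at h
      rw [h]
    · rw [Bool.not_eq_true] at hp
      rw [if_neg (by rw [hp]; decide)] at h
      rw [ih h, pvLift_cons_neg p ps o' hp]
      cases hx : pvLift ps o' with
      | none => rw [Option.map_none, pvMerge_none_left]
      | some q => obtain ⟨qo, qr⟩ := q; simp [pvMerge, pvShift]

-- core: A's preference-major scan equals the first component of B's running minimum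
lemma main_lemma (ps : List String) (os : List String) :
    aOuter ps ((os.map pvLow).zip os) = (bestLoop ps os none).map Prod.fst := by
  induction ps with
  | nil =>
    have h : ∀ os', bestLoop ([] : List String) os' none = none := by
      intro os'; induction os' with
      | nil => rfl
      | cons o os' ih => simp only [bestLoop, rank_alt]; exact ih
    simp [aOuter, h os]
  | cons p ps ih =>
    simp only [aOuter]
    cases h : aScan p ((os.map pvLow).zip os) with
    | some o => rw [bestLoop_zero p ps os o h]; rfl
    | none =>
      rw [bestLoop_shift p ps os h, ih]
      cases bestLoop ps os none with
      | none => rfl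
      | some q => rfl

lemma fallback_eq (os : List String) : (os.filter aNonBlank).head? = firstNonBlank os := by
  induction os with
  | nil => rfl
  | cons o os ih =>
    simp only [List.filter, firstNonBlank]
    have : bNonBlank o = aNonBlank o := rfl
    rw [this]
    cases h : aNonBlank o <;> simp [ih]

-- ===== VERDICT (by name: the statement is the Claim_ definition above) =====
theorem best_option_spec : Claim_equal_best_option := by
  intro options _
  unfold Spec_best_option best_option best_option_alt
  simp only
  have hmap : options.map (fun o => PySem.Str.strip (PySem.Str.lower o)) = options.map pvLow := rfl
  rw [hmap, main_lemma PREFER options]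
  cases bestLoop PREFER options none with
  | none => simpa using fallback_eq options
  | some q => rfl
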